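-- pv_equiv track=rewrite | github.com/andresmoralesc1/pipecat-voice-bot | text_normalizer.py | _normalize_numbers
-- ===== SOURCE A (Python) =====
-- NUMBER_WORDS = {
--     "cero": "0", "uno": "1", "una": "1", "dos": "2", "tres": "3",
--     "cuatro": "4", "cinco": "5", "seis": "6", "siete": "7", "ocho": "8",
--     "nueve": "9"
-- }
--
-- def _normalize_numbers(text: str) -> str:
--     """Normaliza números escritos en formato verbal.
--
--     Convierte expresiones como "seis uno dos" → "612"
--     Solo convierte secuencias de 2+ dígitos para evitar falsos positivos.
--     """
--     words = text.split()
--     result = []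
--     i = 0
--
--     while i < len(words):
--         word = words[i].lower().strip(".,!?;:")
--
--         if word in NUMBER_WORDS:
--             num_sequence = NUMBER_WORDS[word]
--             i += 1
--
--             # Buscar más palabras numéricas consecutivas
--             while i < len(words):
--                 next_word = words[i].lower().strip(".,!?;:")
--                 if next_word in NUMBER_WORDS:
--                     num_sequence += NUMBER_WORDS[next_word]
--                     i += 1
--                 else:
--                     break
--
--             # Solo convertir si tenemos 2+ dígitos (teléfono, código, etc.)
--             if len(num_sequence) >= 2:
--                 result.append(num_sequence)
--             else:
--                 result.append(words[i-1])
--         else: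
--             result.append(words[i])
--             i += 1
--
--     return " ".join(result)
-- ===== SOURCE B (Python) =====
-- NUMBER_WORDS = {
--     "cero": "0", "uno": "1", "una": "1", "dos": "2", "tres": "3",
--     "cuatro": "4", "cinco": "5", "seis": "6", "siete": "7", "ocho": "8",
--     "nueve": "9"
-- }
--
-- def _normalize_numbers(text: str) -> str:
--     words = text.split()
--     digits = [NUMBER_WORDS.get(w.lower().strip(".,!?;:")) for w in words]
--     # Purely local rule: a token is rendered as its digit ("glued") iff it is a
--     # number word AND at least one neighbour is a number word; runs are never
--     # materialized -- "run length >= 2" is equivalent to "has a number neighbour".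
--     left = [None] + digits
--     right = digits[1:] + [None]
--     glued = [d is not None and (l is not None or r is not None)
--              for l, d, r in zip(left, digits, right)]
--     pieces = [d if g else w for w, d, g in zip(words, digits, glued)]
--     if not pieces:
--         return ""
--     out = [pieces[0]]
--     for gprev, g, p in zip(glued, glued[1:], pieces[1:]):
--         out += [p] if (gprev and g) else [" ", p]
--     return "".join(out)
-- ===== Notes on version B (the rewrite author's own statement) =====
-- stated objective: alternative
-- what changed: Replaces A's index-driven scan that collects each consecutive number-word run with a purely local neighbour rule: a token is rendered as its digit iff it is a number word with a number-word neighbour (run length >= 2 iff it has a number neighbour), and the output is assembled with pairwise separators that are empty exactly between two such glued tokens - no run is ever materialized or measured.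
import Mathlib
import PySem

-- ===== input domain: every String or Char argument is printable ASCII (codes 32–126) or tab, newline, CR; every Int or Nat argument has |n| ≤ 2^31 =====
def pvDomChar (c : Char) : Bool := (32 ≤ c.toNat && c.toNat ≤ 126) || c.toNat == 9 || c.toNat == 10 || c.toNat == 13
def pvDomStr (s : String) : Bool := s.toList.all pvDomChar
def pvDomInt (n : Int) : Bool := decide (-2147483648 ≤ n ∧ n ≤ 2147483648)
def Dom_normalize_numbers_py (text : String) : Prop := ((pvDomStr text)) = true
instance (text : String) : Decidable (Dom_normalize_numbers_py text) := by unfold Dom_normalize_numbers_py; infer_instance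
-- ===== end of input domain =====

-- B replaces A's run-collecting scan by a local neighbour rule (a token becomes its digit
-- iff it is a number word with a number-word neighbour) plus pairwise separators; same values.

-- ===== PORT A =====
def pvNUMBER_WORDS : PySem.Dict String String := PySem.Dict.mk
  [("cero","0"),("uno","1"),("una","1"),("dos","2"),("tres","3"),
   ("cuatro","4"),("cinco","5"),("seis","6"),("siete","7"),("ocho","8"),("nueve","9")]

-- word.lower().strip(".,!?;:")
def pvClean (w : String) : String := PySem.Str.stripChars (PySem.Str.lower w) ".,!?;:"

-- A's inner while loop: consume consecutive number words, tracking the last consumed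
-- word (A's words[i-1]), the accumulated digit sequence, and the remaining words.
def pvInnerA : String → String → List String → String × String × List String
  | last, seq, [] => (last, seq, [])
  | last, seq, nw :: rest =>
    if pvNUMBER_WORDS.contains (pvClean nw) then
      pvInnerA nw (seq ++ (pvNUMBER_WORDS.get? (pvClean nw)).getD "") rest
    else (last, seq, nw :: rest)

-- needed by pvLoopA's termination proof
theorem pvInnerA_rem_len : ∀ (rest : List String) (last seq : String),
    (pvInnerA last seq rest).2.2.length ≤ rest.length := by
  intro rest
  induction rest with
  | nil => intro last seq; simp [pvInnerA]
  | cons nw rest ih =>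
    intro last seq
    rw [pvInnerA]
    by_cases h : pvNUMBER_WORDS.contains (pvClean nw)
    · simp only [h, if_pos]
      have := ih nw (seq ++ (pvNUMBER_WORDS.get? (pvClean nw)).getD "")
      simp only [List.length_cons]; omega
    · simp [h]

-- A's outer while loop over the word list.
def pvLoopA : List String → List String
  | [] => []
  | w :: rest =>
    if pvNUMBER_WORDS.contains (pvClean w) then
      (if 2 ≤ PySem.Str.len (pvInnerA w ((pvNUMBER_WORDS.get? (pvClean w)).getD "") rest).2.1
       then (pvInnerA w ((pvNUMBER_WORDS.get? (pvClean w)).getD "") rest).2.1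
       else (pvInnerA w ((pvNUMBER_WORDS.get? (pvClean w)).getD "") rest).1)
        :: pvLoopA (pvInnerA w ((pvNUMBER_WORDS.get? (pvClean w)).getD "") rest).2.2
    else w :: pvLoopA rest
termination_by l => l.length
decreasing_by
  · have := pvInnerA_rem_len rest w ((pvNUMBER_WORDS.get? (pvClean w)).getD "")
    simp only [List.length_cons]; omega
  · simp

def normalize_numbers_py (text : String) : String :=
  PySem.Str.join " " (pvLoopA (PySem.Str.split₀ text))

-- ===== PORT B =====
-- NUMBER_WORDS.get(w.lower().strip(".,!?;:"))
def pvD (w : String) : Option String := pvNUMBER_WORDS.get? (pvClean w)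

def normalize_numbers_py_alt (text : String) : String :=
  let words := PySem.Str.split₀ text
  let digits := words.map pvD
  -- left = [None] + digits ; right = digits[1:] + [None]  (zip truncates to the shortest)
  let left : List (Option String) := none :: digits
  let right : List (Option String) := digits.tail ++ [none]
  let glued := (left.zip (digits.zip right)).map
      (fun t => t.2.1.isSome && (t.1.isSome || t.2.2.isSome))
  let pieces := (words.zip (digits.zip glued)).map
      (fun t => if t.2.2 then t.2.1.getD "" else t.1)
  match pieces with
  | [] => ""
  | p :: ps =>
    PySem.Str.join ""
      ((glued.zip ((glued.drop 1).zip ps)).foldl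
        (fun acc t => acc ++ (if t.1 && t.2.1 then [t.2.2] else [" ", t.2.2])) [p])

-- ===== PRECONDITION & SPEC =====
def Spec_normalize_numbers_py (text : String) (out : String) : Prop := out = normalize_numbers_py_alt text
instance (text : String) (out : String) : Decidable (Spec_normalize_numbers_py text out) := by unfold Spec_normalize_numbers_py; infer_instance

-- ===== CLAIM (what is proved, stated in full; the proofs are below) =====
def Claim_equal_normalize_numbers_py : Prop := ∀ (text : String), Dom_normalize_numbers_py text → Spec_normalize_numbers_py text (normalize_numbers_py text)

-- ===== LEMMAS AND PROOFS =====

theorem pvContains_eq (d : PySem.Dict String String) (k : String) :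
    d.contains k = (d.get? k).isSome := by
  simp [PySem.Dict.contains, PySem.Dict.get?, Option.isSome_map, List.isSome_find?]

-- is-number predicate on raw words
def pvP (w : String) : Bool := (pvD w).isSome

def pvDigitOf (w : String) : String := (pvD w).getD ""

-- digit of the head word (none if the list is empty or its head is not a number word)
def pvPd : List String → Option String
  | [] => none
  | w :: _ => pvD w

-- concatenation of a list of strings
def pvCat (l : List String) : String := String.ofList (l.map String.toList).flatten

-- recursive characterizations of B's zipped lists (l = digit of the previous word)
def pvGl (l : Option String) : List String → List Bool
  | [] => []
  | w :: t => ((pvD w).isSome && (l.isSome || (pvPd t).isSome)) :: pvGl (pvD w) t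

def pvPieces (l : Option String) : List String → List String
  | [] => []
  | w :: t => (if (pvD w).isSome && (l.isSome || (pvPd t).isSome) then (pvD w).getD "" else w)
      :: pvPieces (pvD w) t

-- B's output pieces after the first token, given previous digit l and previous glued flag gp
def pvOut (l : Option String) (gp : Bool) : List String → List String
  | [] => []
  | w :: t =>
    (if gp && ((pvD w).isSome && (l.isSome || (pvPd t).isSome))
     then [if (pvD w).isSome && (l.isSome || (pvPd t).isSome) then (pvD w).getD "" else w]
     else [" ", if (pvD w).isSome && (l.isSome || (pvPd t).isSome) then (pvD w).getD "" else w])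
    ++ pvOut (pvD w) ((pvD w).isSome && (l.isSome || (pvPd t).isSome)) t

-- B's full output piece list
def pvOutFull : List String → List String
  | [] => []
  | w :: t =>
    (if (pvD w).isSome && (pvPd t).isSome then (pvD w).getD "" else w)
      :: pvOut (pvD w) ((pvD w).isSome && (pvPd t).isSome) t

theorem pvCat_nil : pvCat [] = "" := by decide

theorem pvCat_cons (a : String) (l : List String) : pvCat (a :: l) = a ++ pvCat l := by
  apply String.toList_inj.mp
  simp [pvCat]

theorem pvCat_empty_right (a : String) : a ++ pvCat [] = a := by
  rw [pvCat_nil]; apply String.toList_inj.mp; simp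

theorem pvJoin_nil_sep (xss : List (List Char)) : PySem.Chars.join [] xss = xss.flatten := by
  simp only [PySem.Chars.join, List.intercalate]
  induction xss with
  | nil => simp
  | cons x xs ih => cases xs <;> simp_all [List.intersperse]

theorem pvJoin_empty (l : List String) : PySem.Str.join "" l = pvCat l := by
  apply String.toList_inj.mp
  rw [PySem.Str.toList_join]
  have h0 : "".toList = ([] : List Char) := rfl
  rw [h0, pvJoin_nil_sep]
  simp [pvCat]

theorem pvJoin_single (a : String) : PySem.Str.join " " [a] = a := by
  apply String.toList_inj.mp
  rw [PySem.Str.toList_join]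
  simp [PySem.Chars.join, List.intercalate]

theorem pvJoin_cons_cons (a b : String) (l : List String) :
    PySem.Str.join " " (a :: b :: l) = a ++ " " ++ PySem.Str.join " " (b :: l) := by
  apply String.toList_inj.mp
  rw [PySem.Str.toList_join]
  simp only [String.toList_append, PySem.Str.toList_join, List.map_cons]
  simp [PySem.Chars.join, List.intercalate, List.intersperse]

set_option maxHeartbeats 1000000 in
theorem pvDigit_len : ∀ (k v : String), pvNUMBER_WORDS.get? k = some v → v.toList.length = 1 := by
  intro k v h
  simp only [pvNUMBER_WORDS, PySem.Dict.get?_mk_cons] at h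
  split_ifs at h <;> simp [PySem.Dict.get?, List.find?] at h <;> subst h <;> decide

theorem pvInnerA_spec : ∀ (rest : List String) (last seq : String),
    pvInnerA last seq rest =
      ((rest.takeWhile pvP).getLastD last,
       seq ++ pvCat ((rest.takeWhile pvP).map pvDigitOf),
       rest.dropWhile pvP) := by
  intro rest
  induction rest with
  | nil =>
    intro last seq
    refine Prod.ext (by simp [pvInnerA]) (Prod.ext ?_ (by simp [pvInnerA]))
    show seq = (((List.takeWhile pvP []).getLastD last,
       seq ++ pvCat ((List.takeWhile pvP []).map pvDigitOf), List.dropWhile pvP [])).2.1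
    rw [List.takeWhile_nil, List.map_nil, pvCat_empty_right]
  | cons nw rest ih =>
    intro last seq
    by_cases h : pvP nw = true
    · have hc : pvNUMBER_WORDS.contains (pvClean nw) = true := by
        rw [pvContains_eq]; simpa [pvP, pvD] using h
      rw [pvInnerA, if_pos hc, ih nw, List.takeWhile_cons, List.dropWhile_cons,
        if_pos h, if_pos h]
      refine Prod.ext (by rw [List.getLastD_cons]) (Prod.ext ?_ rfl)
      apply String.toList_inj.mp
      simp [List.map_cons, pvCat_cons, pvDigitOf, pvD]
    · have hp : pvP nw = false := by simpa using h
      have hc : pvNUMBER_WORDS.contains (pvClean nw) = false := by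
        rw [pvContains_eq]; simpa [pvP, pvD] using h
      rw [pvInnerA, if_neg (by simp [hc]), List.takeWhile_cons, List.dropWhile_cons,
        if_neg h, if_neg h]
      refine Prod.ext (by simp) (Prod.ext ?_ rfl)
      show seq = seq ++ pvCat (List.map pvDigitOf [])
      rw [List.map_nil, pvCat_empty_right]

theorem pvCat_digits_len (t : List String) (h : ∀ w ∈ t, pvP w = true) :
    (pvCat (t.map pvDigitOf)).toList.length = t.length := by
  induction t with
  | nil => simp [pvCat]
  | cons w t ih =>
    have hw := h w (by simp)
    simp only [pvP, pvD, Option.isSome_iff_exists] at hw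
    obtain ⟨v, hv⟩ := hw
    have h1 : (pvDigitOf w).toList.length = 1 := by
      simp [pvDigitOf, pvD, hv, pvDigit_len _ _ hv]
    rw [List.map_cons, pvCat_cons]
    simp only [String.toList_append, List.length_append, h1,
      ih (fun x hx => h x (by simp [hx])), List.length_cons]
    omega

-- pvLoopA never returns [] on nonempty input
theorem pvLoopA_ne_nil (w : String) (t : List String) : pvLoopA (w :: t) ≠ [] := by
  rw [pvLoopA]
  split_ifs <;> simp

-- the zipped glued list of B is pvGl
theorem pvGl_eq : ∀ (t : List String) (l : Option String),
    ((l :: t.map pvD).zip ((t.map pvD).zip ((t.map pvD).tail ++ [none]))).map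
        (fun x => x.2.1.isSome && (x.1.isSome || x.2.2.isSome)) = pvGl l t := by
  intro t
  induction t with
  | nil => intro l; simp [pvGl]
  | cons w t ih =>
    intro l
    cases t with
    | nil => simp [pvGl, pvPd]
    | cons w' t' =>
      have := ih (pvD w)
      simp only [List.map_cons, List.tail_cons, List.cons_append, List.zip_cons_cons] at this ⊢
      rw [pvGl]
      simp only [List.map_cons, pvPd]
      exact congrArg _ this

-- the zipped pieces list of B is pvPieces
theorem pvPieces_eq : ∀ (t : List String) (l : Option String),
    (t.zip ((t.map pvD).zip (pvGl l t))).map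
        (fun x => if x.2.2 then x.2.1.getD "" else x.1) = pvPieces l t := by
  intro t
  induction t with
  | nil => intro l; simp [pvPieces]
  | cons w t ih =>
    intro l
    rw [pvGl, pvPieces, List.map_cons, List.zip_cons_cons, List.zip_cons_cons, List.map_cons]
    rw [ih (pvD w)]

-- B's separator loop computes pvOut
theorem pvOut_eq : ∀ (t : List String) (l : Option String) (gp : Bool),
    ((gp :: pvGl l t).zip ((pvGl l t).zip (pvPieces l t))).flatMap
        (fun x => if x.1 && x.2.1 then [x.2.2] else [" ", x.2.2]) = pvOut l gp t := by
  intro t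
  induction t with
  | nil => intro l gp; simp [pvGl, pvPieces, pvOut]
  | cons w t ih =>
    intro l gp
    rw [pvGl, pvPieces, pvOut, List.zip_cons_cons, List.zip_cons_cons, List.flatMap_cons]
    rw [ih (pvD w)]

-- boundary step: previous token not glued-to (or start), head of t not a number word
theorem pvOut_boundary (t : List String) (l : Option String) (gp : Bool)
    (h : (l = none ∧ gp = false) ∨ (pvPd t).isSome = false) :
    pvOut l gp t = if t = [] then [] else " " :: pvOutFull t := by
  cases t with
  | nil => simp [pvOut]
  | cons w t' =>
    rw [pvOut, pvOutFull]
    rcases h with ⟨hl, hgp⟩ | h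
    · subst hl hgp; simp
    · simp only [pvPd] at h
      simp [h]

-- consuming a run of number words from a glued position
theorem pvOut_run : ∀ (run : List String) (l : Option String) (t : List String),
    (∀ u ∈ run, pvP u = true) → l.isSome = true → (pvPd t).isSome = false →
    pvOut l true (run ++ t) = run.map pvDigitOf ++ (if t = [] then [] else " " :: pvOutFull t) := by
  intro run
  induction run with
  | nil =>
    intro l t _ _ ht
    rw [List.nil_append, pvOut_boundary t l true (Or.inr ht)]
    simp
  | cons u run' ih =>
    intro l t hall hl ht
    have hu : (pvD u).isSome = true := hall u (by simp)
    rw [List.cons_append, pvOut]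
    have hg : ((pvD u).isSome && (l.isSome || (pvPd (run' ++ t)).isSome)) = true := by
      simp [hu, hl]
    rw [hg]
    simp only [Bool.and_true, if_pos rfl, hu, if_pos rfl]  -- may need adjusting
    rw [ih (pvD u) t (fun x hx => hall x (by simp [hx])) hu ht]
    simp [pvDigitOf]

-- the first word skipped by dropWhile pvP is not a number word
theorem pvPd_dropWhile : ∀ (t : List String), (pvPd (t.dropWhile pvP)).isSome = false := by
  intro t
  induction t with
  | nil => simp [pvPd]
  | cons u t ih =>
    rw [List.dropWhile_cons]
    by_cases hu : pvP u = true
    · rw [if_pos (by simp [hu])]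
      exact ih
    · rw [if_neg (by simpa using hu)]
      show (pvD u).isSome = false
      simpa [pvP] using hu

theorem pvCat_append (a b : List String) : pvCat (a ++ b) = pvCat a ++ pvCat b := by
  apply String.toList_inj.mp
  simp [pvCat]

-- shared assembly for the "head token stays a plain word" cases
theorem pvStep1 (w : String) (t : List String)
    (hA : pvLoopA (w :: t) = w :: pvLoopA t)
    (hB : pvOutFull (w :: t) = w :: (if t = [] then [] else " " :: pvOutFull t))
    (IH : PySem.Str.join " " (pvLoopA t) = pvCat (pvOutFull t)) :
    PySem.Str.join " " (pvLoopA (w :: t)) = pvCat (pvOutFull (w :: t)) := by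
  rw [hA, hB]
  cases t with
  | nil =>
    rw [pvLoopA, pvJoin_single, if_pos rfl, pvCat_cons, pvCat_empty_right]
  | cons u t' =>
    rw [if_neg (by simp)]
    obtain ⟨a, l, hl⟩ : ∃ a l, pvLoopA (u :: t') = a :: l := by
      cases hh : pvLoopA (u :: t') with
      | nil => exact absurd hh (pvLoopA_ne_nil u t')
      | cons a l => exact ⟨a, l, rfl⟩
    rw [hl, pvJoin_cons_cons, ← hl, IH, pvCat_cons, pvCat_cons]
    apply String.toList_inj.mp
    simp

-- isolated number word at the head: t is empty or starts with a non-number word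
theorem pvIso (w : String) (t : List String) (d : String)
    (h : pvD w = some d) (hc : pvNUMBER_WORDS.contains (pvClean w) = true)
    (hgd : pvNUMBER_WORDS.get? (pvClean w) = some d) (hd1 : d.toList.length = 1)
    (hpd' : (pvPd t).isSome = false)
    (IH : PySem.Str.join " " (pvLoopA t) = pvCat (pvOutFull t)) :
    PySem.Str.join " " (pvLoopA (w :: t)) = pvCat (pvOutFull (w :: t)) := by
  have hdrop : t.dropWhile pvP = t := by
    cases t with
    | nil => rfl
    | cons u t' =>
      have hu : pvP u = false := by simpa [pvPd, pvP] using hpd'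
      rw [List.dropWhile_cons, if_neg (by simp [hu])]
  have htake : t.takeWhile pvP = [] := by
    cases t with
    | nil => rfl
    | cons u t' =>
      have hu : pvP u = false := by simpa [pvPd, pvP] using hpd'
      rw [List.takeWhile_cons, if_neg (by simp [hu])]
  refine pvStep1 w t ?_ ?_ IH
  · rw [pvLoopA, if_pos hc, pvInnerA_spec, hgd, htake, hdrop]
    have hcond : ¬ 2 ≤ PySem.Str.len ((some d).getD "" ++ pvCat (List.map pvDigitOf [])) := by
      rw [PySem.Str.len_eq]
      simp only [Option.getD_some, List.map_nil, pvCat_nil]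
      have : (d ++ "").toList.length = 1 := by simp [hd1]
      omega
    rw [if_neg hcond]
    simp
  · rw [pvOutFull]
    simp only [hpd', Bool.and_false, Bool.false_eq_true, reduceIte]
    rw [pvOut_boundary t (pvD w) false (Or.inr hpd')]

-- ===== MAIN LEMMA =====
set_option maxHeartbeats 4000000 in
theorem pvMainB : ∀ (ws : List String),
    PySem.Str.join " " (pvLoopA ws) = pvCat (pvOutFull ws)
  | [] => by rw [pvLoopA, pvOutFull]; rw [pvCat_nil]; rfl
  | w :: t => by
    cases h : pvD w with
    | none =>
      have hp : pvP w = false := by simp [pvP, h]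
      have hc : pvNUMBER_WORDS.contains (pvClean w) = false := by
        rw [pvContains_eq]; simpa [pvD] using h
      refine pvStep1 w t ?_ ?_ (pvMainB t)
      · rw [pvLoopA, if_neg (by simp [hc])]
      · rw [pvOutFull]
        simp only [h, Option.isSome_none, Bool.false_and, Bool.false_eq_true, if_neg,
          reduceIte]
        rw [pvOut_boundary t none false (Or.inl ⟨rfl, rfl⟩)]
    | some d =>
      have hc : pvNUMBER_WORDS.contains (pvClean w) = true := by
        rw [pvContains_eq]
        have : pvNUMBER_WORDS.get? (pvClean w) = some d := h
        simp [this]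
      have hgd : pvNUMBER_WORDS.get? (pvClean w) = some d := h
      have hd1 : d.toList.length = 1 := pvDigit_len _ _ hgd
      cases t with
      | nil => exact pvIso w [] d h hc hgd hd1 rfl (pvMainB [])
      | cons u t' =>
        by_cases hu : pvP u = true
        · -- head of t is a number word: a glued run of length ≥ 2 begins at w
          have hpd : (pvPd (u :: t')).isSome = true := by simpa [pvPd, pvP] using hu
        -- A side
          rw [pvLoopA, if_pos hc, pvInnerA_spec, hgd]
          have hrun : (u :: t').takeWhile pvP = u :: t'.takeWhile pvP := by
            rw [List.takeWhile_cons, if_pos hu]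
          have hmem : ∀ x ∈ (u :: t').takeWhile pvP, pvP x = true :=
            fun x hx => List.mem_takeWhile_imp hx
          have hlen : (d ++ pvCat (((u :: t').takeWhile pvP).map pvDigitOf)).toList.length
              = 1 + ((u :: t').takeWhile pvP).length := by
            simp [hd1, pvCat_digits_len _ hmem]
          have hcond : 2 ≤ PySem.Str.len (d ++ pvCat (((u :: t').takeWhile pvP).map pvDigitOf)) := by
            rw [PySem.Str.len_eq, hlen, hrun]
            simp only [List.length_cons]
            omega
          simp only [Option.getD_some]
          rw [if_pos hcond]
          -- B side
          rw [pvOutFull]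
          have hg0 : ((pvD w).isSome && (pvPd (u :: t')).isSome) = true := by simp [h, hpd]
          rw [hg0]
          simp only [if_pos rfl, h, Option.getD_some]
          have hsplit : u :: t' = ((u :: t').takeWhile pvP) ++ ((u :: t').dropWhile pvP) :=
            (List.takeWhile_append_dropWhile).symm
          rw [show pvOut (some d) true (u :: t')
                = pvOut (some d) true (((u :: t').takeWhile pvP) ++ ((u :: t').dropWhile pvP)) by
              rw [← hsplit]]
          rw [pvOut_run _ _ _ hmem (by simp) (pvPd_dropWhile (u :: t'))]
          have IH := pvMainB ((u :: t').dropWhile pvP)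
          cases hrem : (u :: t').dropWhile pvP with
          | nil =>
            rw [pvLoopA]
            simp only [if_pos rfl, reduceIte]
            rw [pvJoin_single, pvCat_cons, pvCat_append]
            apply String.toList_inj.mp
            simp [pvCat]
          | cons r rs =>
            rw [hrem] at IH
            obtain ⟨a, l, hl⟩ : ∃ a l, pvLoopA (r :: rs) = a :: l := by
              cases hh : pvLoopA (r :: rs) with
              | nil => exact absurd hh (pvLoopA_ne_nil r rs)
              | cons a l => exact ⟨a, l, rfl⟩
            simp only [List.cons_ne_self, reduceIte]
            rw [hl, pvJoin_cons_cons, ← hl, IH, pvCat_cons, pvCat_append,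
              if_neg (List.cons_ne_nil r rs), pvCat_cons]
            apply String.toList_inj.mp
            simp [pvCat]
        · exact pvIso w (u :: t') d h hc hgd hd1 (by simpa [pvPd, pvP] using hu)
            (pvMainB (u :: t'))
  termination_by ws => ws.length
  decreasing_by
    all_goals first
      | exact lt_of_le_of_lt (List.length_dropWhile_le _ _) (by simp)
      | simp

-- assemble B's port into pvOutFull
theorem pvAltChar (text : String) :
    normalize_numbers_py_alt text = pvCat (pvOutFull (PySem.Str.split₀ text)) := by
  unfold normalize_numbers_py_alt
  generalize PySem.Str.split₀ text = ws
  simp only [pvGl_eq, pvPieces_eq]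
  cases ws with
  | nil => rw [pvPieces, pvOutFull, pvCat_nil]
  | cons w t =>
    rw [pvGl, pvPieces]
    simp only [List.drop_succ_cons, List.drop_zero]
    rw [PySem.List.foldl_append_eq_flatMap, pvOut_eq, pvJoin_empty]
    rw [pvOutFull]
    simp [pvPd]

-- ===== VERDICT (by name: the statement is the Claim_ definition above) =====
theorem normalize_numbers_py_spec : Claim_equal_normalize_numbers_py := by
  intro text _
  unfold Spec_normalize_numbers_py normalize_numbers_py
  rw [pvAltChar, pvMainB]
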